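-- pv_equiv track=rewrite | github.com/tsuru7/algorithm-study | AtCoder/ABC261/20221002/E.py | solve
-- ===== SOURCE A (Python) =====
-- def solve(n,c,taList):
--     xtbl0 = [[0 for _ in range(30)] for _ in range(n+1)]
--     xtbl1 = [[1 for _ in range(30)] for _ in range(n+1)]
--     for i in range(1, n+1):
--         t, a = taList[i-1]
--         for j in range(30):
--             if t == 1:
--                 if a & 1<<j > 0:
--                     xtbl0[i][j] = xtbl0[i-1][j] & 1
--                     xtbl1[i][j] = xtbl1[i-1][j] & 1
--                 else:
--                     xtbl0[i][j] = 0
--                     xtbl1[i][j] = 0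
--             elif t == 2:
--                 if a & 1<<j > 0:
--                     xtbl0[i][j] = 1
--                     xtbl1[i][j] = 1
--                 else:
--                     xtbl0[i][j] = xtbl0[i-1][j]
--                     xtbl1[i][j] = xtbl1[i-1][j]
--             else:
--                 if a & 1<<j > 0:
--                     xtbl0[i][j] = xtbl0[i-1][j] ^ 1
--                     xtbl1[i][j] = xtbl1[i-1][j] ^ 1
--                 else:
--                     xtbl0[i][j] = xtbl0[i-1][j] ^ 0
--                     xtbl1[i][j] = xtbl1[i-1][j] ^ 0
--
--     x = c
--     ans=[]
--     for i in range(1, n+1):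
--         tmp = 0
--         for j in range(30)[::-1]:
--             tmp <<= 1
--             if x & 1<<j > 0:
--                 tmp += xtbl1[i][j]
--             else:
--                 tmp += xtbl0[i][j]
--         ans.append(tmp)
--         x = tmp
--
--     return ans
-- ===== SOURCE B (Python) =====
-- def solve(n, c, taList):
--     MASK = (1 << 30) - 1
--     and_mask = MASK
--     xor_mask = 0
--     x = c
--     ans = []
--     for t, a in taList[:max(0, n)]:
--         a &= MASK
--         if t == 1:
--             and_mask &= a
--             xor_mask &= a
--         elif t == 2:
--             na = MASK ^ a          # complement of a within the 30-bit universe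
--             and_mask &= na
--             xor_mask = (xor_mask & na) | a
--         else:
--             xor_mask ^= a
--         x = (x & and_mask) ^ xor_mask
--         ans.append(x)
--     return ans
-- ===== Notes on version B (the rewrite author's own statement) =====
-- stated objective: simpler
-- what changed: B replaces A's two (n+1)x30 precomputed bit tables and the per-step 30-bit inner loops by two composite 30-bit integers (and_mask, xor_mask) updated in a single pass over the operations, emitting each output as (x & and_mask) ^ xor_mask.
import Mathlib
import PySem

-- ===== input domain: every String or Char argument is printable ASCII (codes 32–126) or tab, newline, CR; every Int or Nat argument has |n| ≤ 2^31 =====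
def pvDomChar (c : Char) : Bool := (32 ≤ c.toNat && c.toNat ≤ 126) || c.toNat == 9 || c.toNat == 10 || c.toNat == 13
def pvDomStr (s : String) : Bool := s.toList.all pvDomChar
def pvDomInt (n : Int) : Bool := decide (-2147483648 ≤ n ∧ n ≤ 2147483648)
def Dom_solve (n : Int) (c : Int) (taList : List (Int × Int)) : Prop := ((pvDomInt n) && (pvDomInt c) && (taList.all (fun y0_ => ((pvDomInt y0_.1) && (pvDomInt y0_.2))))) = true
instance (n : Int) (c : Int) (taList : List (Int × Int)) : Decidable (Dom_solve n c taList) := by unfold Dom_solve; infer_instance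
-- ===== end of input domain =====

-- B replaces A's two (n+1)×30 bit tables and the per-step 30-bit inner loops by two composite
-- 30-bit masks (and_mask, xor_mask) updated in one pass: each output is (x & and_mask) ^ xor_mask.

-- ===== PORT A =====
-- A-side helper: the inner `for j in range(30)` loop building table row i from row i-1
def arowRow (ta : Int × Int) (prev : List (Int × Int)) : List (Int × Int) :=
  (PySem.List.pyRange 0 30).map (fun j =>
    let p := PySem.List.pyGetD prev j (0, 0)
    if ta.1 = 1 then
      if PySem.Int.band ta.2 ((1 : Int) <<< j) > 0 then
        (PySem.Int.band p.1 1, PySem.Int.band p.2 1)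
      else ((0 : Int), (0 : Int))
    else if ta.1 = 2 then
      if PySem.Int.band ta.2 ((1 : Int) <<< j) > 0 then ((1 : Int), (1 : Int))
      else (p.1, p.2)
    else
      if PySem.Int.band ta.2 ((1 : Int) <<< j) > 0 then
        (PySem.Int.bxor p.1 1, PySem.Int.bxor p.2 1)
      else (PySem.Int.bxor p.1 0, PySem.Int.bxor p.2 0))

-- one iteration of A's first `for i in range(1, n+1)` loop (row i appended to the table)
def arow (taList : List (Int × Int)) (tbl : List (List (Int × Int))) (i : Int) : List (List (Int × Int)) :=
  tbl ++ [arowRow (PySem.List.pyGetD taList (i - 1) (0, 0)) (PySem.List.pyGetD tbl (i - 1) [])]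

-- A-side helper: the inner `for j in range(30)[::-1]` loop assembling one output value
def atmp (x : Int) (row : List (Int × Int)) : Int :=
  ((PySem.List.slice? (PySem.List.pyRange 0 30) none none (-1)).getD []).foldl
    (fun tmp j =>
      if PySem.Int.band x ((1 : Int) <<< j) > 0 then tmp <<< (1 : Int) + (PySem.List.pyGetD row j (0, 0)).2
      else tmp <<< (1 : Int) + (PySem.List.pyGetD row j (0, 0)).1) 0

-- one iteration of A's second `for i in range(1, n+1)` loop
def astep (tbl : List (List (Int × Int))) (st : List Int × Int) (i : Int) : List Int × Int :=
  let tmp := atmp st.2 (PySem.List.pyGetD tbl i [])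
  (st.1 ++ [tmp], tmp)

def solve (n : Int) (c : Int) (taList : List (Int × Int)) : List Int :=
  let row0 : List (Int × Int) := (PySem.List.pyRange 0 30).map (fun _ => ((0 : Int), (1 : Int)))
  let tbl := (PySem.List.pyRange 1 (n + 1)).foldl (arow taList) [row0]
  ((PySem.List.pyRange 1 (n + 1)).foldl (astep tbl) ([], c)).1

-- ===== PORT B =====
def mask30 : Int := ((1 : Int) <<< (30 : Int)) - 1

def bstep (st : Int × Int × Int × List Int) (ta : Int × Int) : Int × Int × Int × List Int :=
  let a := PySem.Int.band ta.2 mask30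
  let p : Int × Int :=
    if ta.1 = 1 then (PySem.Int.band st.1 a, PySem.Int.band st.2.1 a)
    else if ta.1 = 2 then
      let na := PySem.Int.bxor mask30 a
      (PySem.Int.band st.1 na, PySem.Int.bor (PySem.Int.band st.2.1 na) a)
    else (st.1, PySem.Int.bxor st.2.1 a)
  let x' := PySem.Int.bxor (PySem.Int.band st.2.2.1 p.1) p.2
  (p.1, p.2, x', st.2.2.2 ++ [x'])

def solve_alt (n : Int) (c : Int) (taList : List (Int × Int)) : List Int :=
  ((PySem.List.slice taList none (some (max 0 n))).foldl bstep (mask30, 0, c, [])).2.2.2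

-- ===== PRECONDITION & SPEC =====
-- Pre_ excludes exactly the inputs where A raises IndexError: n larger than len(taList).
def Pre_solve (n : Int) (c : Int) (taList : List (Int × Int)) : Prop :=
  n ≤ (taList.length : Int)
instance (n : Int) (c : Int) (taList : List (Int × Int)) : Decidable (Pre_solve n c taList) := by
  unfold Pre_solve; infer_instance

def pvWitness_solve : Int × Int × (List (Int × Int)) := (2, 5, [(1, 3), (3, 6)])

def Spec_solve (n : Int) (c : Int) (taList : List (Int × Int)) (out : List Int) : Prop :=
  out = solve_alt n c taList
instance (n : Int) (c : Int) (taList : List (Int × Int)) (out : List Int) : Decidable (Spec_solve n c taList out) := by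
  unfold Spec_solve; infer_instance

-- ===== CLAIM (what is proved, stated in full; the proofs are below) =====
def Claim_equal_solve : Prop := ∀ (n : Int) (c : Int) (taList : List (Int × Int)),
  Dom_solve n c taList → Pre_solve n c taList → Spec_solve n c taList (solve n c taList)

-- ===== LEMMAS AND PROOFS =====

-- ---- generic two's-complement bit lemmas for the PySem bitwise primitives ----

theorem tb_sub_and (x : Nat) : ∀ (m j : Nat), (x - (x &&& m)).testBit j = (x.testBit j && !(m.testBit j)) := by
  induction x using Nat.strong_induction_on with
  | _ x ih =>
    intro m j
    rcases Nat.eq_zero_or_pos x with hx | hx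
    · subst hx; simp
    · have hdiv : (x &&& m) / 2 = x / 2 &&& m / 2 := Nat.and_div_two
      have hle1 : x &&& m ≤ x := Nat.and_le_left
      have hiff : (x &&& m) % 2 = 1 ↔ (x % 2 = 1 ∧ m % 2 = 1) := Nat.and_mod_two_eq_one
      cases j with
      | zero =>
        have hs2 : (x - (x &&& m)) % 2 = x % 2 - (x &&& m) % 2 := by omega
        rcases Nat.mod_two_eq_zero_or_one x with h1 | h1 <;>
          rcases Nat.mod_two_eq_zero_or_one m with h2 | h2 <;>
            have hA : (x &&& m) % 2 = x % 2 * (m % 2) := by rw [h1, h2]; omega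
        all_goals simp [Nat.testBit_zero, hs2, hA, h1, h2]
      | succ j =>
        have hsdiv : (x - (x &&& m)) / 2 = x / 2 - (x / 2 &&& m / 2) := by omega
        rw [Nat.testBit_succ, Nat.testBit_succ, Nat.testBit_succ, hsdiv]
        exact ih (x / 2) (Nat.div_lt_self hx (by norm_num)) (m / 2) j

theorem tb_natCast (n : Nat) (j : Nat) : ((n : Int)).testBit j = n.testBit j := rfl

theorem tb_negSucc (n : Nat) (j : Nat) : (Int.negSucc n).testBit j = !(n.testBit j) := rfl

theorem tb_band (a b : Int) (j : Nat) :
    (PySem.Int.band a b).testBit j = (a.testBit j && b.testBit j) := by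
  cases a with
  | ofNat m =>
    cases b with
    | ofNat n =>
      simp [PySem.Int.band, tb_natCast, Nat.testBit_and]
    | negSucc n =>
      have h1 : ¬ (0 : Int) ≤ Int.negSucc n := by simp [Int.negSucc_eq]; omega
      simp [PySem.Int.band, h1, tb_natCast, tb_negSucc, tb_sub_and]
  | negSucc m =>
    have h1 : ¬ (0 : Int) ≤ Int.negSucc m := by simp [Int.negSucc_eq]; omega
    cases b with
    | ofNat n =>
      simp [PySem.Int.band, h1, tb_natCast, tb_negSucc, tb_sub_and, Bool.and_comm]
    | negSucc n =>
      have h3 : ¬ (0 : Int) ≤ Int.negSucc n := by simp [Int.negSucc_eq]; omega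
      have h5 : -((((m ||| n) : Nat)) : Int) - 1 = Int.negSucc (m ||| n) := by
        rw [Int.negSucc_eq]; ring
      simp [PySem.Int.band, h1, h3, h5, tb_negSucc, Nat.testBit_or]

theorem tb_bor (a b : Int) (j : Nat) :
    (PySem.Int.bor a b).testBit j = (a.testBit j || b.testBit j) := by
  cases a with
  | ofNat m =>
    cases b with
    | ofNat n => simp [PySem.Int.bor, tb_natCast, Nat.testBit_or]
    | negSucc n =>
      have h1 : ¬ (0 : Int) ≤ Int.negSucc n := by simp [Int.negSucc_eq]; omega
      have h5 : -(((n - (n &&& m) : Nat)) : Int) - 1 = Int.negSucc (n - (n &&& m)) := by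
        rw [Int.negSucc_eq]; ring
      simp [PySem.Int.bor, h1, h5, tb_natCast, tb_negSucc, tb_sub_and, Bool.or_comm]
  | negSucc m =>
    have h1 : ¬ (0 : Int) ≤ Int.negSucc m := by simp [Int.negSucc_eq]; omega
    cases b with
    | ofNat n =>
      have h5 : -(((m - (m &&& n) : Nat)) : Int) - 1 = Int.negSucc (m - (m &&& n)) := by
        rw [Int.negSucc_eq]; ring
      simp [PySem.Int.bor, h1, h5, tb_natCast, tb_negSucc, tb_sub_and]
      try (cases Nat.testBit m j <;> cases Nat.testBit n j <;> rfl)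
    | negSucc n =>
      have h3 : ¬ (0 : Int) ≤ Int.negSucc n := by simp [Int.negSucc_eq]; omega
      have h5 : -((((m &&& n) : Nat)) : Int) - 1 = Int.negSucc (m &&& n) := by
        rw [Int.negSucc_eq]; ring
      simp [PySem.Int.bor, h1, h3, h5, tb_negSucc, Nat.testBit_and]

theorem tb_bxor (a b : Int) (j : Nat) :
    (PySem.Int.bxor a b).testBit j = (a.testBit j ^^ b.testBit j) := by
  cases a with
  | ofNat m =>
    cases b with
    | ofNat n => simp [PySem.Int.bxor, tb_natCast, Nat.testBit_xor]
    | negSucc n =>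
      have h1 : ¬ (0 : Int) ≤ Int.negSucc n := by simp [Int.negSucc_eq]; omega
      have h5 : -(((m ^^^ n : Nat)) : Int) - 1 = Int.negSucc (m ^^^ n) := by
        rw [Int.negSucc_eq]; ring
      simp [PySem.Int.bxor, h1, h5, tb_natCast, tb_negSucc, Nat.testBit_xor]
      try (cases Nat.testBit m j <;> cases Nat.testBit n j <;> rfl)
  | negSucc m =>
    have h1 : ¬ (0 : Int) ≤ Int.negSucc m := by simp [Int.negSucc_eq]; omega
    cases b with
    | ofNat n =>
      have h5 : -(((m ^^^ n : Nat)) : Int) - 1 = Int.negSucc (m ^^^ n) := by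
        rw [Int.negSucc_eq]; ring
      simp [PySem.Int.bxor, h1, h5, tb_natCast, tb_negSucc, Nat.testBit_xor]
      try (cases Nat.testBit m j <;> cases Nat.testBit n j <;> rfl)
    | negSucc n =>
      have h3 : ¬ (0 : Int) ≤ Int.negSucc n := by simp [Int.negSucc_eq]; omega
      simp [PySem.Int.bxor, h1, h3, tb_natCast, tb_negSucc, Nat.testBit_xor]
      try (cases Nat.testBit m j <;> cases Nat.testBit n j <;> rfl)

theorem tb_pos (x : Int) (jN : Nat) :
    (0 < PySem.Int.band x ((2 ^ jN : Nat) : Int)) ↔ x.testBit jN = true := by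
  have hpow : 0 < 2 ^ jN := Nat.two_pow_pos jN
  cases x with
  | ofNat m =>
    rw [show ((Int.ofNat m) : Int) = ((m : Nat) : Int) from rfl, PySem.Int.band_natCast]
    rw [show (↑m : Int).testBit jN = Nat.testBit m jN from rfl]
    rw [show (0 : Int) < ((m &&& 2 ^ jN : Nat) : Int) ↔ 0 < (m &&& 2 ^ jN : Nat) by exact_mod_cast Iff.rfl]
    rw [Nat.and_two_pow]
    cases hb : Nat.testBit m jN <;> simp [hb] <;> omega
  | negSucc m =>
    have h1 : ¬ (0 : Int) ≤ Int.negSucc m := by simp [Int.negSucc_eq]; omega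
    have h2 : (-(Int.negSucc m) - 1).toNat = m := by rw [Int.negSucc_eq]; omega
    have hand : 2 ^ jN &&& m = (m.testBit jN).toNat * 2 ^ jN := by
      rw [Nat.and_comm]; exact Nat.and_two_pow m jN
    simp only [PySem.Int.band, h1, h2, if_neg h1, if_pos (Int.natCast_nonneg _),
      Int.toNat_natCast, hand, tb_negSucc]
    cases hb : Nat.testBit m jN <;> simp [hb] <;> omega

theorem mod_two_pow_succ (v k : Nat) :
    v % 2 ^ (k + 1) = (if v.testBit k then 2 ^ k else 0) + v % 2 ^ k := by
  have h1 : v % (2 ^ k * 2) = v % 2 ^ k + 2 ^ k * (v / 2 ^ k % 2) := Nat.mod_mul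
  have h2 : v.testBit k = decide (v / 2 ^ k % 2 = 1) := Nat.testBit_eq_decide_div_mod_eq
  rw [pow_succ, h1, h2]
  rcases Nat.mod_two_eq_zero_or_one (v / 2 ^ k) with h | h <;> simp [h] <;> omega

theorem foldRevAux (e : Nat → Int) (v : Nat)
    (he : ∀ jN, jN < 30 → e jN = if v.testBit jN then 1 else 0) :
    ∀ k, k ≤ 30 → ∀ t0 : Int,
      ((List.range k).reverse).foldl (fun t jN => t * 2 + e jN) t0 = t0 * 2 ^ k + ↑(v % 2 ^ k) := by
  intro k
  induction k with
  | zero => intro _ t0; simp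
  | succ k ih =>
    intro hk t0
    rw [List.range_succ, List.reverse_append]
    simp only [List.reverse_singleton, List.singleton_append, List.foldl_cons]
    rw [ih (by omega) (t0 * 2 + e k), he k (by omega), mod_two_pow_succ]
    cases hb : v.testBit k <;> simp <;> push_cast <;> ring

-- ---- program-specific bookkeeping ----

def bI (b : Bool) : Int := if b then 1 else 0

-- "is a 30-bit value": nonnegative with no bits at positions ≥ 30
def Mv (v : Int) : Prop := 0 ≤ v ∧ ∀ j : Nat, 30 ≤ j → v.testBit j = false

-- the table row representing the composite transform b ↦ (b & am) ^ xm
def rowOf (am xm : Int) : List (Int × Int) :=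
  (PySem.List.pyRange 0 30).map (fun j =>
    (bI (xm.testBit j.toNat), bI (am.testBit j.toNat ^^ xm.testBit j.toNat)))

-- B's state after k operations
def msk (taL : List (Int × Int)) (c : Int) (k : Nat) : Int × Int × Int × List Int :=
  List.foldl bstep (mask30, 0, c, []) (taL.take k)

-- the two mask updates of bstep, per branch
def newA (am : Int) (ta : Int × Int) : Int :=
  let a := PySem.Int.band ta.2 mask30
  if ta.1 = 1 then PySem.Int.band am a
  else if ta.1 = 2 then PySem.Int.band am (PySem.Int.bxor mask30 a)
  else am

def newX (xm : Int) (ta : Int × Int) : Int :=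
  let a := PySem.Int.band ta.2 mask30
  if ta.1 = 1 then PySem.Int.band xm a
  else if ta.1 = 2 then PySem.Int.bor (PySem.Int.band xm (PySem.Int.bxor mask30 a)) a
  else PySem.Int.bxor xm a

theorem bstep_def (st : Int × Int × Int × List Int) (ta : Int × Int) :
    bstep st ta =
      (newA st.1 ta, newX st.2.1 ta,
       PySem.Int.bxor (PySem.Int.band st.2.2.1 (newA st.1 ta)) (newX st.2.1 ta),
       st.2.2.2 ++ [PySem.Int.bxor (PySem.Int.band st.2.2.1 (newA st.1 ta)) (newX st.2.1 ta)]) := by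
  unfold bstep newA newX
  split_ifs <;> rfl

theorem mask30_eq : mask30 = ((2 ^ 30 - 1 : Nat) : Int) := by decide

theorem tb_mask30 (j : Nat) : mask30.testBit j = decide (j < 30) := by
  rw [mask30_eq, tb_natCast, Nat.testBit_two_pow_sub_one]

theorem tb_zero (j : Nat) : (0 : Int).testBit j = false := by
  rw [show (0 : Int) = ((0 : Nat) : Int) from rfl, tb_natCast, Nat.zero_testBit]

theorem tb_toNat (v : Int) (h : 0 ≤ v) (j : Nat) : v.toNat.testBit j = v.testBit j := by
  cases v with
  | ofNat m => rfl
  | negSucc m => exact absurd h (by simp [Int.negSucc_eq]; omega)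

theorem band_nonneg (a b : Int) (hb : 0 ≤ b) : 0 ≤ PySem.Int.band a b := by
  rw [PySem.Int.band_comm]; exact PySem.Int.band_nonneg_of_nonneg_left a hb

theorem bxor_nonneg (a b : Int) (ha : 0 ≤ a) (hb : 0 ≤ b) : 0 ≤ PySem.Int.bxor a b := by
  simp [PySem.Int.bxor, ha, hb]

theorem bor_nonneg (a b : Int) (ha : 0 ≤ a) (hb : 0 ≤ b) : 0 ≤ PySem.Int.bor a b := by
  simp [PySem.Int.bor, ha, hb]

theorem Mv_mask30 : Mv mask30 :=
  ⟨by rw [mask30_eq]; exact Int.natCast_nonneg _,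
   fun j hj => by rw [tb_mask30]; simpa using by omega⟩

theorem Mv_zero : Mv 0 := ⟨le_refl 0, fun j _ => tb_zero j⟩

theorem Mv_band_mask (a : Int) : Mv (PySem.Int.band a mask30) :=
  ⟨band_nonneg a mask30 Mv_mask30.1,
   fun j hj => by rw [tb_band, tb_mask30]; simp; omega⟩

theorem Mv_band_right (a b : Int) (hb : Mv b) : Mv (PySem.Int.band a b) :=
  ⟨band_nonneg a b hb.1, fun j hj => by rw [tb_band, hb.2 j hj]; simp⟩

theorem Mv_bxor (a b : Int) (ha : Mv a) (hb : Mv b) : Mv (PySem.Int.bxor a b) :=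
  ⟨bxor_nonneg a b ha.1 hb.1, fun j hj => by rw [tb_bxor, ha.2 j hj, hb.2 j hj]; rfl⟩

theorem Mv_bor (a b : Int) (ha : Mv a) (hb : Mv b) : Mv (PySem.Int.bor a b) :=
  ⟨bor_nonneg a b ha.1 hb.1, fun j hj => by rw [tb_bor, ha.2 j hj, hb.2 j hj]; rfl⟩

theorem Mv_newA (am : Int) (ta : Int × Int) (ham : Mv am) : Mv (newA am ta) := by
  unfold newA
  split_ifs
  · exact Mv_band_right _ _ (Mv_band_mask _)
  · exact Mv_band_right _ _ (Mv_bxor _ _ Mv_mask30 (Mv_band_mask _))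
  · exact ham

theorem Mv_newX (xm : Int) (ta : Int × Int) (hxm : Mv xm) : Mv (newX xm ta) := by
  unfold newX
  split_ifs
  · exact Mv_band_right _ _ (Mv_band_mask _)
  · exact Mv_bor _ _ (Mv_band_right _ _ (Mv_bxor _ _ Mv_mask30 (Mv_band_mask _))) (Mv_band_mask _)
  · exact Mv_bxor _ _ hxm (Mv_band_mask _)

theorem msk_zero (taL : List (Int × Int)) (c : Int) : msk taL c 0 = (mask30, 0, c, []) := rfl

theorem msk_succ (taL : List (Int × Int)) (c : Int) (k : Nat) (h : k < taL.length) :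
    msk taL c (k + 1) = bstep (msk taL c k) taL[k] := by
  unfold msk
  rw [List.take_succ_eq_append_getElem h, List.foldl_append]
  rfl

theorem Mv_msk (taL : List (Int × Int)) (c : Int) (k : Nat) :
    Mv (msk taL c k).1 ∧ Mv (msk taL c k).2.1 := by
  induction k with
  | zero => exact ⟨Mv_mask30, Mv_zero⟩
  | succ k ih =>
    by_cases h : k < taL.length
    · rw [msk_succ taL c k h, bstep_def]
      exact ⟨Mv_newA _ _ ih.1, Mv_newX _ _ ih.2⟩
    · have : taL.take (k+1) = taL.take k := by
        rw [List.take_of_length_le (by omega), List.take_of_length_le (by omega)]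
      unfold msk
      rw [this]
      exact ih

-- one row step of A applied to the row representing (am, xm) is the row of the updated masks
theorem rowstep (ta : Int × Int) (am xm : Int) (ham : Mv am) (hxm : Mv xm) :
    arowRow ta (rowOf am xm) = rowOf (newA am ta) (newX xm ta) := by
  unfold arowRow rowOf
  apply List.map_congr_left
  intro j hj
  rw [PySem.List.mem_pyRange_one] at hj
  have hjc : ((j.toNat : Nat) : Int) = j := Int.toNat_of_nonneg hj.1
  have hj30 : j.toNat < 30 := by omega
  rw [PySem.List.pyGetD_map_pyRange_of_nonneg _ 30 j _ hj.1 hj.2]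
  have hcond : (0 < PySem.Int.band ta.2 ((1 : Int) <<< j)) ↔ ta.2.testBit j.toNat = true := by
    rw [← hjc, Int.one_shiftLeft]; exact tb_pos _ _
  have htba : (PySem.Int.band ta.2 mask30).testBit j.toNat = ta.2.testBit j.toNat := by
    rw [tb_band, tb_mask30]; simp [hj30]
  unfold newA newX
  simp only [gt_iff_lt]
  by_cases h1 : ta.1 = 1 <;> by_cases h2 : ta.1 = 2 <;>
    by_cases hc : ta.2.testBit j.toNat = true <;>
      simp only [h1, h2, if_true, if_false, hcond, hc, if_pos, if_neg, reduceIte,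
        Bool.not_eq_true] <;>
      (try simp only [tb_band, tb_bor, tb_bxor, tb_mask30, htba, hc, decide_eq_true_eq, hj30,
        decide_true, Bool.not_eq_true]) <;>
      cases hx : xm.testBit j.toNat <;> cases ha : am.testBit j.toNat <;>
        first
          | decide
          | (simp only [hx, ha]; decide)
          | (simp only [hx]; decide)
          | (simp only [ha]; decide)
          | simp [bI, tb_band, tb_bor, tb_bxor, tb_mask30, htba, hx, ha, hc, hj30, tb_zero]

-- A's inner 30-bit reconstruction loop computes (x & am) ^ xm
theorem atmp_rowOf (x am xm : Int) (ham : Mv am) (hxm : Mv xm) :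
    atmp x (rowOf am xm) = PySem.Int.bxor (PySem.Int.band x am) xm := by
  have hv0 : 0 ≤ PySem.Int.bxor (PySem.Int.band x am) xm :=
    bxor_nonneg _ _ (band_nonneg _ _ ham.1) hxm.1
  set v : Int := PySem.Int.bxor (PySem.Int.band x am) xm with hv
  have hvhigh : ∀ j : Nat, 30 ≤ j → v.testBit j = false := by
    intro j hj
    rw [hv, tb_bxor, tb_band, ham.2 j hj, hxm.2 j hj]; simp
  have hvlt : v.toNat < 2 ^ 30 :=
    Nat.lt_pow_two_of_testBit _ (fun i hi => by rw [tb_toNat v hv0]; exact hvhigh i hi)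
  unfold atmp
  simp only [rowOf]
  rw [show (PySem.List.slice? (PySem.List.pyRange 0 30) none none (-1)).getD [] =
        (List.range 30).reverse.map (fun k : Nat => (k : Int)) by decide]
  rw [List.foldl_map]
  rw [PySem.List.foldl_congr_mem _ _
    (fun t jN => t * 2 + (if v.toNat.testBit jN then 1 else 0)) 0 ?_]
  · rw [foldRevAux _ v.toNat (fun jN _ => rfl) 30 (le_refl 30) 0]
    rw [Nat.mod_eq_of_lt hvlt]
    simp [Int.toNat_of_nonneg hv0]
  · intro acc jN hjN
    rw [List.mem_reverse, List.mem_range] at hjN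
    have h2 : acc <<< ((1 : Nat) : Int) = acc * 2 := by
      rw [Int.shiftLeft_eq_mul_pow]; norm_num
    rw [show ((1 : Nat) : Int) = (1 : Int) from rfl] at h2
    rw [PySem.List.pyGetD_map_pyRange_of_nonneg _ 30 (jN : Int) _ (by positivity) (by exact_mod_cast hjN)]
    have hcond : (0 < PySem.Int.band x ((1 : Int) <<< (jN : Int))) ↔ x.testBit jN = true := by
      rw [Int.one_shiftLeft]; exact tb_pos _ _
    have hvb : v.toNat.testBit jN = ((x.testBit jN && am.testBit jN) ^^ xm.testBit jN) := by
      rw [tb_toNat v hv0, hv, tb_bxor, tb_band]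
    simp only [gt_iff_lt, hcond, h2, Int.toNat_natCast, hvb]
    by_cases hx : x.testBit jN = true <;>
      cases ha : am.testBit jN <;> cases hxx : xm.testBit jN <;>
        simp [bI, hx, ha, hxx]

-- row 0 of A's table is the row of the identity transform (mask30, 0)
theorem row0_eq :
    (PySem.List.pyRange 0 30).map (fun _ => ((0 : Int), (1 : Int))) = rowOf mask30 0 := by
  unfold rowOf
  apply List.map_congr_left
  intro j hj
  rw [PySem.List.mem_pyRange_one] at hj
  have hj30 : j.toNat < 30 := by omega
  simp [bI, tb_zero, tb_mask30, hj30]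

-- A's first loop builds exactly the rows of B's successive mask pairs
theorem tbl_eq (taL : List (Int × Int)) (c : Int) (k : Nat) (hk : (k : Int) ≤ (taL.length : Int)) :
    (PySem.List.pyRange 1 ((k : Int) + 1)).foldl (arow taL) [rowOf mask30 0] =
      (PySem.List.pyRange 0 ((k : Int) + 1)).map
        (fun i => rowOf (msk taL c i.toNat).1 (msk taL c i.toNat).2.1) := by
  induction k with
  | zero =>
    rw [show ((0 : Nat) : Int) + 1 = 1 by norm_num]
    rw [show PySem.List.pyRange 1 1 = [] by decide, show PySem.List.pyRange 0 1 = [0] by decide]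
    simp [msk_zero]
  | succ k ih =>
    have hklen : k < taL.length := by
      have := hk; push_cast at this; omega
    have hk' : (k : Int) ≤ (taL.length : Int) := by push_cast; omega
    have h1 : (((k + 1 : Nat)) : Int) + 1 = ((k : Int) + 1) + 1 := by push_cast; ring
    rw [h1]
    rw [PySem.List.pyRange_one_succ_right (a := 0) (b := (k : Int) + 1) (by omega)]
    rw [PySem.List.pyRange_one_succ_right (a := 1) (b := (k : Int) + 1) (by omega)]
    rw [List.foldl_append, List.map_append, ih hk']
    simp only [List.foldl_cons, List.foldl_nil, List.map_cons, List.map_nil]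
    unfold arow
    have hidx : (k : Int) + 1 - 1 = ((k : Nat) : Int) := by ring
    have htn : ((k : Int) + 1).toNat = k + 1 := by omega
    rw [hidx, PySem.List.pyGetD_natCast, PySem.List.pyGetD_map_pyRange_of_nonneg _ _ _ _
          (Int.natCast_nonneg k) (by omega)]
    rw [List.getD_eq_getElem taL (0, 0) hklen, Int.toNat_natCast]
    rw [rowstep taL[k] _ _ (Mv_msk taL c k).1 (Mv_msk taL c k).2]
    rw [htn, msk_succ taL c k hklen, bstep_def]

-- A's second loop produces exactly B's accumulated outputs and running value
theorem ans_eq (taL : List (Int × Int)) (c : Int) (tbl : List (List (Int × Int))) (N : Int)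
    (hlen : N ≤ (taL.length : Int))
    (htbl : tbl = (PySem.List.pyRange 0 (N + 1)).map
        (fun i => rowOf (msk taL c i.toNat).1 (msk taL c i.toNat).2.1)) :
    ∀ k : Nat, (k : Int) ≤ N →
      (PySem.List.pyRange 1 ((k : Int) + 1)).foldl (astep tbl) ([], c) =
        ((msk taL c k).2.2.2, (msk taL c k).2.2.1) := by
  intro k
  induction k with
  | zero =>
    intro _
    rw [show ((0 : Nat) : Int) + 1 = 1 by norm_num, show PySem.List.pyRange 1 1 = [] by decide]
    rfl
  | succ k ih =>
    intro hk
    have hkN : (k : Int) ≤ N := by push_cast at hk; omega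
    have hklen : k < taL.length := by push_cast at hk; omega
    have h1 : (((k + 1 : Nat)) : Int) + 1 = ((k : Int) + 1) + 1 := by push_cast; ring
    have htn : ((k : Int) + 1).toNat = k + 1 := by omega
    rw [h1, PySem.List.pyRange_one_succ_right (a := 1) (b := (k : Int) + 1) (by omega),
        List.foldl_append, ih hkN]
    simp only [List.foldl_cons, List.foldl_nil]
    unfold astep
    rw [htbl, PySem.List.pyGetD_map_pyRange_of_nonneg _ _ _ _ (by omega) (by omega), htn]
    rw [atmp_rowOf _ _ _ (Mv_msk taL c (k + 1)).1 (Mv_msk taL c (k + 1)).2]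
    rw [msk_succ taL c k hklen, bstep_def]

-- ===== VERDICT (by name: the statement is the Claim_ definition above) =====
theorem solve_spec : Claim_equal_solve := by
  intro n c taL _ hpre
  unfold Spec_solve Pre_solve at *
  by_cases hn : n ≤ 0
  · -- both loops are empty
    have hr : PySem.List.pyRange 1 (n + 1) = [] := by simp [PySem.List.pyRange]; omega
    have hm : max 0 n = ((0 : Nat) : Int) := by simp; omega
    unfold solve solve_alt
    rw [hr, hm, PySem.List.slice_to_natCast]
    rfl
  · have hkc : ((n.toNat : Nat) : Int) = n := Int.toNat_of_nonneg (by omega)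
    have hklen : (n.toNat : Int) ≤ (taL.length : Int) := by rw [hkc]; exact hpre
    have hm : max 0 n = ((n.toNat : Nat) : Int) := by rw [hkc]; omega
    unfold solve solve_alt
    rw [hm, PySem.List.slice_to_natCast, ← hkc]
    show (List.foldl
        (astep (List.foldl (arow taL)
          [(PySem.List.pyRange 0 30).map (fun _ => ((0 : Int), (1 : Int)))]
          (PySem.List.pyRange 1 ((n.toNat : Int) + 1))))
        ([], c) (PySem.List.pyRange 1 ((n.toNat : Int) + 1))).1 =
      (List.foldl bstep (mask30, 0, c, []) (List.take ((n.toNat : Int)).toNat taL)).2.2.2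
    rw [row0_eq, tbl_eq taL c n.toNat hklen,
        ans_eq taL c _ ((n.toNat : Nat) : Int) hklen rfl n.toNat (le_refl _), Int.toNat_natCast]
    rfl
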